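-- pv_equiv track=rewrite | github.com/amshrestha2020/CodeSignal | CodeSignal/InterviewPractices/productExceptSelf.py | solution
-- ===== SOURCE A (Python) =====
-- def solution(nums, m):
--     n = len(nums)
--
--     # Initialize arrays to store the prefix products and suffix products
--     prefix_products = [1] * n
--     suffix_products = [1] * n
--
--     # Calculate prefix products
--     for i in range(1, n):
--         prefix_products[i] = (prefix_products[i - 1] * nums[i - 1]) % m
--
--     # Calculate suffix products
--     for i in range(n - 2, -1, -1):
--         suffix_products[i] = (suffix_products[i + 1] * nums[i + 1]) % m
--
--     # Calculate the sum of products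
--     g_value = 0
--     for i in range(n):
--         g_value = (g_value + prefix_products[i] * suffix_products[i]) % m
--
--     return g_value
-- ===== SOURCE B (Python) =====
-- def solution(nums, m):
--     # Online DP in a single forward pass with two scalars, no arrays:
--     # P = product of elements seen so far (mod m),
--     # S = sum over seen indices i of product of seen elements except nums[i] (mod m).
--     # Appending x: each except-product gains a factor x, and the new index
--     # contributes the product of all previous elements, i.e. P.
--     P, S = 1, 0
--     for x in nums:
--         S = (S * x + P) % m
--         P = (P * x) % m
--     return S
-- ===== Notes on version B (the rewrite author's own statement) =====
-- stated objective: simpler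
-- what changed: Replaces the three-pass prefix/suffix-array construction by a single forward pass maintaining only two scalars (running product P and running except-product sum S) via the online recurrence S' = S*x + P, P' = P*x, using no arrays at all.
import Mathlib
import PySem

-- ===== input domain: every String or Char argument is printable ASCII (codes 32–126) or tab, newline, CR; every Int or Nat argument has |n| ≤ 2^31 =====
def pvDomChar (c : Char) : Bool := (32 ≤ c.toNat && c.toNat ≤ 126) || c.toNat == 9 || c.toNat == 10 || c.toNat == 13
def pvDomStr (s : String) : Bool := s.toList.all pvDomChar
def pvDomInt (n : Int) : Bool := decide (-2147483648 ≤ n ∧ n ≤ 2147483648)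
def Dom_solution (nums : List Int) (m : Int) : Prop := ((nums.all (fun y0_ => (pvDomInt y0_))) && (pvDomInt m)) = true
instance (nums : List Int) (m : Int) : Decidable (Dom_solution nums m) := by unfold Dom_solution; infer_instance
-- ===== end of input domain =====

-- B replaces A's three passes and two arrays by a single forward pass keeping two scalars
-- (running product P and running except-product sum S, S' = S*x + P, P' = P*x) (objective: simpler).


-- ===== PORT A =====
def solution (nums : List Int) (m : Int) : Int :=
  let n : Int := nums.length
  let prefixProducts := PySem.List.pyRepeat [(1:Int)] n
  let suffixProducts := PySem.List.pyRepeat [(1:Int)] n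
  let prefixProducts := (PySem.List.pyRange 1 n 1).foldl
    (fun p i => PySem.List.pySetD p i
      (PySem.Int.mod (PySem.List.pyGetD p (i-1) 0 * PySem.List.pyGetD nums (i-1) 0) m)) prefixProducts
  let suffixProducts := (PySem.List.pyRange (n-2) (-1) (-1)).foldl
    (fun s i => PySem.List.pySetD s i
      (PySem.Int.mod (PySem.List.pyGetD s (i+1) 0 * PySem.List.pyGetD nums (i+1) 0) m)) suffixProducts
  (PySem.List.pyRange 0 n 1).foldl
    (fun g i => PySem.Int.mod (g + PySem.List.pyGetD prefixProducts i 0 * PySem.List.pyGetD suffixProducts i 0) m) 0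

-- ===== PORT B =====
-- single forward fold over nums with state (P, S); returns S
def solution_alt (nums : List Int) (m : Int) : Int :=
  let st := nums.foldl (fun (st : Int × Int) x =>
    (PySem.Int.mod (st.1 * x) m, PySem.Int.mod (st.2 * x + st.1) m)) (1, 0)
  st.2

-- ===== PRECONDITION & SPEC =====
-- Pre_ excludes exactly the inputs where A raises ZeroDivisionError: m = 0 with a nonempty list.
def Pre_solution (nums : List Int) (m : Int) : Prop := nums = [] ∨ m ≠ 0
instance (nums : List Int) (m : Int) : Decidable (Pre_solution nums m) := by unfold Pre_solution; infer_instance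
def pvWitness_solution : List Int × Int := ([2, 3, 4], 5)
def Spec_solution (nums : List Int) (m : Int) (out : Int) : Prop := out = solution_alt nums m
instance (nums : List Int) (m : Int) (out : Int) : Decidable (Spec_solution nums m out) := by unfold Spec_solution; infer_instance

-- ===== CLAIM (what is proved, stated in full; the proofs are below) =====
def Claim_equal_solution : Prop := ∀ (nums : List Int) (m : Int), Dom_solution nums m → Pre_solution nums m → Spec_solution nums m (solution nums m)

-- ===== LEMMAS AND PROOFS =====

-- A's mod-reduced prefix product at index i
def pvP (nums : List Int) (m : Int) : Nat → Int
  | 0 => 1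
  | i + 1 => PySem.Int.mod (pvP nums m i * nums.getD i 0) m

-- A's mod-reduced suffix product at distance k from the right end
def pvSg (nums : List Int) (m : Int) : Nat → Int
  | 0 => 1
  | k + 1 => PySem.Int.mod (pvSg nums m k * nums.getD (nums.length - 1 - k) 0) m

-- A's mod-reduced suffix product at index i
def pvS (nums : List Int) (m : Int) (i : Nat) : Int := pvSg nums m (nums.length - 1 - i)

-- B's running sum after k elements
def pvSB (nums : List Int) (m : Int) : Nat → Int
  | 0 => 0
  | k + 1 => PySem.Int.mod (pvSB nums m k * nums.getD k 0 + pvP nums m k) m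

-- the unreduced except-product sum over the first k elements
def pvTS (nums : List Int) : Nat → Int
  | 0 => 0
  | k + 1 => pvTS nums k * nums.getD k 0 + (nums.take k).prod

lemma pvS_step (nums : List Int) (m : Int) (j : Nat) (h1 : 1 ≤ j) (h2 : j ≤ nums.length - 1) :
    pvS nums m (j - 1) = PySem.Int.mod (pvS nums m j * nums.getD j 0) m := by
  unfold pvS
  rw [show nums.length - 1 - (j-1) = (nums.length - 1 - j) + 1 by omega]
  simp only [pvSg]
  rw [show nums.length - 1 - (nums.length - 1 - j) = j by omega]

-- floor-mod absorbs an inner floor-mod in a sum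
lemma pv_mod_mod_add (a b m : Int) :
    PySem.Int.mod (PySem.Int.mod a m + b) m = PySem.Int.mod (a + b) m := by
  simp [PySem.Int.mod]

lemma pv_foldl_mod_sum (m : Int) (l : List Int) (x : Int) :
    l.foldl (fun g a => PySem.Int.mod (g + a) m) (PySem.Int.mod x m)
      = PySem.Int.mod (x + l.sum) m := by
  induction l generalizing x with
  | nil => simp
  | cons a l ih =>
    simp only [List.foldl_cons, pv_mod_mod_add, List.sum_cons]
    rw [ih (x + a)]; ring_nf

-- A's prefix fill
lemma pvA_prefix (nums : List Int) (m : Int) (k : Nat) (hk : k ≤ nums.length) :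
    (PySem.List.pyRange 1 (k : Int) 1).foldl
      (fun p i => PySem.List.pySetD p i
        (PySem.Int.mod (PySem.List.pyGetD p (i-1) 0 * PySem.List.pyGetD nums (i-1) 0) m))
      (List.replicate nums.length (1:Int))
    = (List.range k).map (pvP nums m) ++ List.replicate (nums.length - k) 1 := by
  induction k with
  | zero => simp [PySem.List.pyRange_one_eq_nil]
  | succ k ih =>
    by_cases hk0 : k = 0
    · subst hk0
      rw [show ((1:Nat) : Int) = 1 by norm_cast, PySem.List.pyRange_one_eq_nil (by norm_num)]
      have hn : 1 ≤ nums.length := hk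
      rw [show nums.length = (nums.length - 1) + 1 by omega]
      simp [List.replicate_succ, pvP]
    · have hk1 : 1 ≤ (k:Int) := by exact_mod_cast Nat.one_le_iff_ne_zero.mpr hk0
      rw [show ((k+1 : Nat) : Int) = (k : Int) + 1 by push_cast; ring,
        PySem.List.pyRange_one_succ_right hk1, List.foldl_append, ih (by omega)]
      simp only [List.foldl_cons, List.foldl_nil]
      have hkl : k < nums.length := by omega
      have h1 : ((k:Int) - 1) = ((k - 1 : Nat) : Int) := by push_cast [Nat.cast_sub (by omega : 1 ≤ k)]; ring
      rw [h1]
      rw [PySem.List.pyGetD_natCast, PySem.List.pyGetD_natCast, PySem.List.pySetD_natCast]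
      have hgd : ((List.range k).map (pvP nums m) ++ List.replicate (nums.length - k) 1).getD (k-1) 0
          = pvP nums m (k-1) := by
        rw [List.getD_eq_getElem?_getD, List.getElem?_append_left (by simp; omega)]
        simp [List.getElem?_map, List.getElem?_range (by omega : k - 1 < k)]
      rw [hgd]
      have hv : PySem.Int.mod (pvP nums m (k-1) * nums.getD (k-1) 0) m = pvP nums m k := by
        conv_rhs => rw [show k = (k-1)+1 by omega]
        simp [pvP]
      rw [hv]
      rw [List.set_append]
      simp only [List.length_map, List.length_range, if_neg (lt_irrefl k), Nat.sub_self]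
      rw [show nums.length - k = (nums.length - (k+1)) + 1 by omega, List.replicate_succ, List.set_cons_zero]
      rw [List.range_succ, List.map_append]
      simp

-- A's suffix fill
lemma pvA_suffix (nums : List Int) (m : Int) (j : Nat) (hj : j ≤ nums.length - 1)
    (hn : nums ≠ []) :
    (PySem.List.pyRange ((j : Int) - 1) (-1) (-1)).foldl
      (fun s i => PySem.List.pySetD s i
        (PySem.Int.mod (PySem.List.pyGetD s (i+1) 0 * PySem.List.pyGetD nums (i+1) 0) m))
      (List.replicate j (1:Int) ++ (List.range (nums.length - j)).map (fun t => pvS nums m (j + t)))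
    = (List.range nums.length).map (pvS nums m) := by
  induction j with
  | zero =>
    rw [show ((0:Nat):Int) - 1 = -1 by norm_num, PySem.List.pyRange_neg_one_eq_nil (by norm_num)]
    simp
  | succ j ih =>
    have hlen : 1 ≤ nums.length := by
      cases nums with | nil => exact absurd rfl hn | cons a l => simp
    rw [show ((j+1 : Nat) : Int) - 1 = (j : Int) by push_cast; ring,
      PySem.List.pyRange_neg_one_cons (by omega : (-1:Int) < (j:Int))]
    simp only [List.foldl_cons]
    have hstep :
        PySem.List.pySetD
          (List.replicate (j+1) (1:Int) ++ (List.range (nums.length - (j+1))).map (fun t => pvS nums m (j + 1 + t)))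
          (j : Int)
          (PySem.Int.mod
            (PySem.List.pyGetD
              (List.replicate (j+1) (1:Int) ++ (List.range (nums.length - (j+1))).map (fun t => pvS nums m (j + 1 + t)))
              ((j:Int)+1) 0 * PySem.List.pyGetD nums ((j:Int)+1) 0) m)
        = List.replicate j (1:Int) ++ (List.range (nums.length - j)).map (fun t => pvS nums m (j + t)) := by
      rw [show ((j:Int) + 1) = ((j+1 : Nat) : Int) by push_cast; ring]
      rw [PySem.List.pyGetD_natCast, PySem.List.pyGetD_natCast, PySem.List.pySetD_natCast]
      have hg1 : (List.replicate (j+1) (1:Int) ++ (List.range (nums.length - (j+1))).map (fun t => pvS nums m (j + 1 + t))).getD (j+1) 0 = pvS nums m (j+1) := by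
        rw [List.getD_eq_getElem?_getD, List.getElem?_append_right (by simp)]
        simp only [List.length_replicate, Nat.sub_self]
        rw [List.getElem?_map, List.getElem?_range (by omega : 0 < nums.length - (j+1))]
        simp
      rw [hg1]
      have hv : PySem.Int.mod (pvS nums m (j+1) * nums.getD (j+1) 0) m = pvS nums m j := by
        have := pvS_step nums m (j+1) (by omega) (by omega)
        simpa using this.symm
      rw [hv]
      rw [show List.replicate (j+1) (1:Int) = List.replicate j 1 ++ [1] by
        rw [← List.replicate_succ']
      ]
      rw [List.append_assoc, List.set_append]
      simp only [List.length_replicate, lt_irrefl, Nat.sub_self]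
      rw [show nums.length - j = (nums.length - (j+1)) + 1 by omega, List.range_succ_eq_map]
      simp only [List.singleton_append, List.set_cons_zero, List.map_cons, List.map_map]
      all_goals simp
      all_goals (intro a _; congr 1; omega)
    rw [hstep, ih (by omega)]

lemma pv_foldl_mod_eq_sum (m : Int) (l : List Int) (hl : l ≠ []) :
    l.foldl (fun g a => PySem.Int.mod (g + a) m) 0 = PySem.Int.mod l.sum m := by
  cases l with
  | nil => exact absurd rfl hl
  | cons a l =>
    simp only [List.foldl_cons, zero_add, List.sum_cons]
    exact pv_foldl_mod_sum m l a

-- Python's floor mod is congruent to its argument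
lemma pv_mod_modeq (a m : Int) : Int.ModEq m (PySem.Int.mod a m) a := by
  have h := Int.fmod_add_mul_fdiv a m
  have : a - PySem.Int.mod a m = m * a.fdiv m := by
    simp only [PySem.Int.mod]; linarith
  exact (Int.modEq_iff_dvd.mpr ⟨a.fdiv m, this⟩)

-- congruent arguments have equal floor mods
lemma pv_mod_congr {a b m : Int} (h : Int.ModEq m a b) : PySem.Int.mod a m = PySem.Int.mod b m := by
  obtain ⟨k, hk⟩ := Int.modEq_iff_dvd.mp h
  have hb : b = a + m * k := by linarith
  subst hb
  simp [PySem.Int.mod, Int.add_mul_fmod_self_left]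

lemma pv_sum_modeq (m : Int) (f g : Nat → Int) (l : List Nat)
    (h : ∀ i ∈ l, Int.ModEq m (f i) (g i)) :
    Int.ModEq m ((l.map f).sum) ((l.map g).sum) := by
  induction l with
  | nil => rfl
  | cons a l ih =>
    simp only [List.map_cons, List.sum_cons]
    exact (h a (by simp)).add (ih (fun i hi => h i (by simp [hi])))

lemma pvP_modeq (nums : List Int) (m : Int) (k : Nat) (hk : k ≤ nums.length) :
    Int.ModEq m (pvP nums m k) ((nums.take k).prod) := by
  induction k with
  | zero => simp [pvP]
  | succ k ih =>
    have hkl : k < nums.length := by omega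
    have htake : nums.take (k+1) = nums.take k ++ [nums[k]] := by
      rw [List.take_add_one, List.getElem?_eq_getElem hkl]; rfl
    rw [htake]
    simp only [pvP, List.prod_append, List.prod_cons, List.prod_nil, mul_one]
    have hgd : nums.getD k 0 = nums[k] := by
      simp [List.getD_eq_getElem?_getD, List.getElem?_eq_getElem hkl]
    rw [hgd]
    exact (pv_mod_modeq _ m).trans ((ih (by omega)).mul_right _)

lemma pvSg_modeq (nums : List Int) (m : Int) (k : Nat) (hk : k ≤ nums.length) :
    Int.ModEq m (pvSg nums m k) ((nums.drop (nums.length - k)).prod) := by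
  induction k with
  | zero => simp [pvSg]
  | succ k ih =>
    have hidx : nums.length - 1 - k < nums.length := by omega
    have heq : nums.length - (k+1) = nums.length - 1 - k := by omega
    have hdrop : nums.drop (nums.length - (k+1))
        = nums[nums.length - 1 - k] :: nums.drop (nums.length - k) := by
      rw [heq, List.drop_eq_getElem_cons hidx,
        show nums.length - 1 - k + 1 = nums.length - k by omega]
    rw [hdrop]
    simp only [pvSg, List.prod_cons]
    have hgd : nums.getD (nums.length - 1 - k) 0 = nums[nums.length - 1 - k] := by
      simp [List.getD_eq_getElem?_getD, List.getElem?_eq_getElem hidx]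
    rw [hgd]
    refine (pv_mod_modeq _ m).trans ?_
    have := (ih (by omega)).mul_right (nums[nums.length - 1 - k])
    calc pvSg nums m k * nums[nums.length - 1 - k]
        ≡ (nums.drop (nums.length - k)).prod * nums[nums.length - 1 - k] [ZMOD m] := this
      _ = nums[nums.length - 1 - k] * (nums.drop (nums.length - k)).prod := by ring

-- the recursive unreduced sum equals the except-product sum over the first k elements
lemma pvTS_sum (nums : List Int) (k : Nat) (hk : k ≤ nums.length) :
    pvTS nums k
      = ((List.range k).map
          (fun i => (nums.take i).prod * ((nums.take k).drop (i+1)).prod)).sum := by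
  induction k with
  | zero => simp [pvTS]
  | succ k ih =>
    have hkl : k < nums.length := by omega
    have htake : nums.take (k+1) = nums.take k ++ [nums[k]] := by
      rw [List.take_add_one, List.getElem?_eq_getElem hkl]; rfl
    rw [List.range_succ, List.map_append, List.sum_append]
    simp only [List.map_cons, List.map_nil, List.sum_cons, List.sum_nil, add_zero]
    have hlast : ((nums.take (k+1)).drop (k+1)).prod = 1 := by
      rw [List.drop_of_length_le (by rw [List.length_take]; omega)]; rfl
    have hmap : (List.range k).map
          (fun i => (nums.take i).prod * ((nums.take (k+1)).drop (i+1)).prod)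
        = (List.range k).map
          (fun i => ((nums.take i).prod * ((nums.take k).drop (i+1)).prod) * nums[k]) := by
      apply List.map_congr_left
      intro i hi
      have hik : i < k := List.mem_range.mp hi
      rw [htake, List.drop_append_of_le_length (by simp; omega)]
      simp [mul_assoc]
    rw [hlast, hmap, mul_one]
    simp only [pvTS]
    rw [ih (by omega)]
    have hgd : nums.getD k 0 = nums[k] := by
      simp [List.getD_eq_getElem?_getD, List.getElem?_eq_getElem hkl]
    rw [hgd, List.sum_map_mul_right]

-- B's fold over the first k elements
lemma pvB_fold (nums : List Int) (m : Int) (k : Nat) (hk : k ≤ nums.length) :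
    (nums.take k).foldl (fun (st : Int × Int) x =>
        (PySem.Int.mod (st.1 * x) m, PySem.Int.mod (st.2 * x + st.1) m)) (1, 0)
    = (pvP nums m k, pvSB nums m k) := by
  induction k with
  | zero => simp [pvP, pvSB]
  | succ k ih =>
    have hkl : k < nums.length := by omega
    rw [List.take_add_one, List.getElem?_eq_getElem hkl]
    simp only [Option.toList_some, List.foldl_append, List.foldl_cons, List.foldl_nil, ih (by omega)]
    have hgd : nums.getD k 0 = nums[k] := by
      simp [List.getD_eq_getElem?_getD, List.getElem?_eq_getElem hkl]
    simp [pvP, pvSB, List.getD_eq_getElem?_getD, List.getElem?_eq_getElem hkl]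

lemma pvSB_eq_mod (nums : List Int) (m : Int) (k : Nat) (h1 : 1 ≤ k) (hk : k ≤ nums.length) :
    pvSB nums m k = PySem.Int.mod (pvTS nums k) m := by
  induction k with
  | zero => omega
  | succ k ih =>
    by_cases hk0 : k = 0
    · subst hk0
      simp [pvSB, pvTS, pvP]
    · have hSB : Int.ModEq m (pvSB nums m k) (pvTS nums k) := by
        rw [ih (by omega) (by omega)]
        exact pv_mod_modeq _ m
      have hP : Int.ModEq m (pvP nums m k) ((nums.take k).prod) := pvP_modeq nums m k (by omega)
      simp only [pvSB, pvTS]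
      exact pv_mod_congr ((hSB.mul_right _).add hP)

-- ===== VERDICT (by name: the statement is the Claim_ definition above) =====
theorem solution_spec : Claim_equal_solution := by
  intro nums m _ _
  unfold Spec_solution solution solution_alt
  dsimp only
  by_cases hn : nums = []
  · subst hn; rfl
  · have hn1 : 1 ≤ nums.length := by cases nums with | nil => exact absurd rfl hn | cons a l => simp
    have hrep : PySem.List.pyRepeat [(1:Int)] (nums.length : Int) = List.replicate nums.length 1 := by
      rw [PySem.List.pyRepeat_singleton]; simp
    have hpreA : (PySem.List.pyRange 1 (nums.length : Int) 1).foldl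
        (fun p i => PySem.List.pySetD p i
          (PySem.Int.mod (PySem.List.pyGetD p (i-1) 0 * PySem.List.pyGetD nums (i-1) 0) m))
        (PySem.List.pyRepeat [(1:Int)] (nums.length : Int))
        = (List.range nums.length).map (pvP nums m) := by
      rw [hrep, pvA_prefix nums m nums.length le_rfl]
      simp
    have hstate : List.replicate nums.length (1:Int)
        = List.replicate (nums.length - 1) (1:Int)
          ++ (List.range (nums.length - (nums.length - 1))).map (fun t => pvS nums m ((nums.length - 1) + t)) := by
      rw [show nums.length - (nums.length - 1) = 1 by omega]
      simp only [List.range_one, List.map_cons, List.map_nil, Nat.add_zero]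
      rw [show pvS nums m (nums.length - 1) = 1 by simp [pvS, pvSg]]
      rw [← List.replicate_succ']
      congr 1
      omega
    have hsufA : (PySem.List.pyRange ((nums.length : Int) - 2) (-1) (-1)).foldl
        (fun s i => PySem.List.pySetD s i
          (PySem.Int.mod (PySem.List.pyGetD s (i+1) 0 * PySem.List.pyGetD nums (i+1) 0) m))
        (PySem.List.pyRepeat [(1:Int)] (nums.length : Int))
        = (List.range nums.length).map (pvS nums m) := by
      rw [hrep, show ((nums.length : Int) - 2) = ((nums.length - 1 : Nat) : Int) - 1 by
        push_cast [Nat.cast_sub hn1]; ring]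
      rw [hstate, pvA_suffix nums m (nums.length - 1) le_rfl hn]
    rw [hpreA, hsufA]
    -- A's sum loop
    have hA : (PySem.List.pyRange 0 (nums.length : Int) 1).foldl
        (fun g i => PySem.Int.mod (g + PySem.List.pyGetD ((List.range nums.length).map (pvP nums m)) i 0
          * PySem.List.pyGetD ((List.range nums.length).map (pvS nums m)) i 0) m) 0
        = PySem.Int.mod ((List.range nums.length).map (fun i => pvP nums m i * pvS nums m i)).sum m := by
      rw [PySem.List.pyRange_zero_natCast, List.foldl_map]
      have hcong : List.foldl
          (fun x (y : Nat) => PySem.Int.mod (x + PySem.List.pyGetD ((List.range nums.length).map (pvP nums m)) (y:Int) 0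
            * PySem.List.pyGetD ((List.range nums.length).map (pvS nums m)) (y:Int) 0) m) 0 (List.range nums.length)
          = List.foldl (fun x (y : Nat) => PySem.Int.mod (x + pvP nums m y * pvS nums m y) m) 0 (List.range nums.length) := by
        apply List.foldl_ext
        intro b i hi
        have hi' : i < nums.length := List.mem_range.mp hi
        rw [PySem.List.pyGetD_natCast, PySem.List.pyGetD_natCast,
          List.getD_eq_getElem?_getD, List.getD_eq_getElem?_getD, List.getElem?_map, List.getElem?_map,
          List.getElem?_range hi']
        simp
      have hfm : List.foldl (fun g a => PySem.Int.mod (g + a) m) 0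
          ((List.range nums.length).map (fun i => pvP nums m i * pvS nums m i))
          = List.foldl (fun x (y : Nat) => PySem.Int.mod (x + pvP nums m y * pvS nums m y) m) 0
            (List.range nums.length) := by
        rw [List.foldl_map]
      rw [hcong, ← hfm]
      exact pv_foldl_mod_eq_sum m _ (by simp; omega)
    rw [hA]
    -- B's fold
    have hB : nums.foldl (fun (st : Int × Int) x =>
        (PySem.Int.mod (st.1 * x) m, PySem.Int.mod (st.2 * x + st.1) m)) (1, 0)
        = (pvP nums m nums.length, pvSB nums m nums.length) := by
      conv_lhs => rw [← List.take_length (l := nums)]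
      exact pvB_fold nums m nums.length le_rfl
    rw [hB]
    dsimp only
    rw [pvSB_eq_mod nums m nums.length hn1 le_rfl]
    -- both sides are floor mods of congruent sums
    apply pv_mod_congr
    have hterm : ∀ i ∈ List.range nums.length,
        Int.ModEq m (pvP nums m i * pvS nums m i)
          ((nums.take i).prod * ((nums.take nums.length).drop (i+1)).prod) := by
      intro i hi
      have hi' : i < nums.length := List.mem_range.mp hi
      have hP := pvP_modeq nums m i (by omega)
      have hS : Int.ModEq m (pvS nums m i) ((nums.drop (i+1)).prod) := by
        have := pvSg_modeq nums m (nums.length - 1 - i) (by omega)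
        rw [show nums.length - (nums.length - 1 - i) = i + 1 by omega] at this
        exact this
      rw [List.take_length]
      exact hP.mul hS
    have := pv_sum_modeq m _ _ (List.range nums.length) hterm
    rw [← pvTS_sum nums nums.length le_rfl] at this
    exact this
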